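-- pv_equiv track=rewrite | github.com/maxon461/PythonLabs | Lab_2/data_processing.py | count_requests_by_code
-- ===== SOURCE A (Python) =====
-- def count_requests_by_code(log_lines):
--     counts = {'200': 0, '302': 0, '404': 0}
--     for line in log_lines:
--         try:
--             code = line.split()[8]
--             if code in counts:
--                 counts[code] += 1
--         except IndexError:
--             pass
--     return counts
-- ===== SOURCE B (Python) =====
-- def count_requests_by_code(log_lines):
--     # Stage 1: extract the 9th field of every line that has one (no counting yet).
--     codes = [parts[8] for parts in map(str.split, log_lines) if len(parts) > 8]
--     # Stage 2: one list.count scan per reported code (no accumulator dict at all).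
--     return {c: codes.count(c) for c in ('200', '302', '404')}
-- ===== Notes on version B (the rewrite author's own statement) =====
-- stated objective: alternative
-- what changed: B keeps no counter state at all: it first materialises the list of 9th fields via a map/filter comprehension (len guard replacing A's try/except), then answers with three independent list.count scans, one per reported code, instead of A's incremental filter-and-increment into a dict.
import Mathlib
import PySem

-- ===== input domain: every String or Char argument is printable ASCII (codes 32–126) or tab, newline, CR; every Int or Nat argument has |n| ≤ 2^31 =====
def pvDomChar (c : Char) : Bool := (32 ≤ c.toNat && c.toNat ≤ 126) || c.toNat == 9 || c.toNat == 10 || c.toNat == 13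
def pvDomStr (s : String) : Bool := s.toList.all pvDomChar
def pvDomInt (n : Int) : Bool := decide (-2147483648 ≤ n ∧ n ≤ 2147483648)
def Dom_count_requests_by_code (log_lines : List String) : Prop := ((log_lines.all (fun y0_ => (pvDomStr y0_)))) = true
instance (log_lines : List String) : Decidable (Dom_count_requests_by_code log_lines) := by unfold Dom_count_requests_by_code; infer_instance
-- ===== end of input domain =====

-- B keeps no counter state: it extracts the list of 9th fields once, then counts each of the three codes with an independent list.count scan; objective: alternative (same cost, different shape).

-- ===== PORT A =====
-- A: filter-and-increment inline into the fixed 3-key dict; try/except IndexError = match on pyGet?.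
def count_requests_by_code (log_lines : List String) : List (String × Int) :=
  (log_lines.foldl (fun counts line =>
      match PySem.List.pyGet? (PySem.Str.split₀ line) 8 with
      | none => counts                 -- IndexError: pass
      | some code =>
        if counts.contains code then counts.modify code 0 (· + 1) else counts)
    ((((PySem.Dict.empty).insert "200" 0).insert "302" 0).insert "404" 0)).items

-- ===== PORT B =====
-- B: stage 1 = comprehension [parts[8] for parts in map(split, lines) if len(parts) > 8];
--    stage 2 = {c: codes.count(c) for the three fixed codes}.
def count_requests_by_code_alt (log_lines : List String) : List (String × Int) :=
  let codes := (log_lines.map PySem.Str.split₀).filterMap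
      (fun parts => if 8 < parts.length then some (PySem.List.pyGetD parts 8 "") else none)
  (["200", "302", "404"]).map (fun c => (c, (PySem.List.count codes c : Int)))

-- ===== PRECONDITION & SPEC =====
def Spec_count_requests_by_code (log_lines : List String) (out : List (String × Int)) : Prop := out = count_requests_by_code_alt log_lines
instance (log_lines : List String) (out : List (String × Int)) : Decidable (Spec_count_requests_by_code log_lines out) := by unfold Spec_count_requests_by_code; infer_instance

-- ===== CLAIM (what is proved, stated in full; the proofs are below) =====
def Claim_equal_count_requests_by_code : Prop := ∀ (log_lines : List String), Dom_count_requests_by_code log_lines → Spec_count_requests_by_code log_lines (count_requests_by_code log_lines)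

-- ===== LEMMAS AND PROOFS =====

-- the list of 9th fields of all lines that have one
def pvCodes (log_lines : List String) : List String :=
  log_lines.filterMap (fun line => PySem.List.pyGet? (PySem.Str.split₀ line) 8)

def pvDict3 (a b c : Int) : PySem.Dict String Int :=
  (((PySem.Dict.empty).insert "200" a).insert "302" b).insert "404" c

lemma pvA_fold (ls : List String) : ∀ (a b c : Int),
    ls.foldl (fun counts line =>
      match PySem.List.pyGet? (PySem.Str.split₀ line) 8 with
      | none => counts
      | some code =>
        if counts.contains code then counts.modify code 0 (· + 1) else counts)
      (pvDict3 a b c)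
    = pvDict3 (a + (pvCodes ls).count "200") (b + (pvCodes ls).count "302")
        (c + (pvCodes ls).count "404") := by
  induction ls with
  | nil => intro a b c; simp [pvCodes]
  | cons l ls ih =>
    intro a b c
    simp only [List.foldl_cons]
    have hcodes : pvCodes (l :: ls)
        = (PySem.List.pyGet? (PySem.Str.split₀ l) 8).toList ++ pvCodes ls := by
      simp [pvCodes, List.filterMap_cons]
      cases PySem.List.pyGet? (PySem.Str.split₀ l) 8 <;> simp
    cases hg : PySem.List.pyGet? (PySem.Str.split₀ l) 8 with
    | none => rw [ih]; simp [hcodes, hg]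
    | some code =>
      rw [hcodes, hg]
      by_cases h200 : code = "200"
      · subst h200
        have hc : (pvDict3 a b c).contains "200" = true := by
          simp [pvDict3, PySem.Dict.contains_insert]
        simp only [hc, if_true]
        have hm : (pvDict3 a b c).modify "200" 0 (· + 1) = pvDict3 (a + 1) b c := by
          simp [pvDict3, PySem.Dict.modify, PySem.Dict.insert, PySem.Dict.empty, PySem.Dict.getD, PySem.Dict.get?]
        rw [hm, ih]
        simp [pvDict3, PySem.Dict.insert, PySem.Dict.empty]
        omega
      · by_cases h302 : code = "302"
        · subst h302
          have hc : (pvDict3 a b c).contains "302" = true := by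
            simp [pvDict3, PySem.Dict.contains_insert]
          simp only [hc, if_true]
          have hm : (pvDict3 a b c).modify "302" 0 (· + 1) = pvDict3 a (b + 1) c := by
            simp [pvDict3, PySem.Dict.modify, PySem.Dict.insert, PySem.Dict.empty, PySem.Dict.getD, PySem.Dict.get?]
          rw [hm, ih]
          simp [pvDict3, PySem.Dict.insert, PySem.Dict.empty]
          omega
        · by_cases h404 : code = "404"
          · subst h404
            have hc : (pvDict3 a b c).contains "404" = true := by
              simp [pvDict3, PySem.Dict.contains_insert]
            simp only [hc, if_true]
            have hm : (pvDict3 a b c).modify "404" 0 (· + 1) = pvDict3 a b (c + 1) := by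
              simp [pvDict3, PySem.Dict.modify, PySem.Dict.insert, PySem.Dict.empty, PySem.Dict.getD, PySem.Dict.get?]
            rw [hm, ih]
            simp [pvDict3, PySem.Dict.insert, PySem.Dict.empty]
            omega
          · have hc : (pvDict3 a b c).contains code = false := by
              simp [pvDict3, PySem.Dict.contains_insert]
              exact ⟨fun h => h404 (by simpa using h), fun h => h302 (by simpa using h),
                fun h => h200 (by simpa using h)⟩
            simp only [hc, Bool.false_eq_true, if_false]
            rw [ih]
            simp [h200, h302, h404]

-- B's stage-1 comprehension produces exactly pvCodes: the len guard is pyGet?'s in-range case.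
lemma pvB_codes (ls : List String) :
    (ls.map PySem.Str.split₀).filterMap
      (fun parts => if 8 < parts.length then some (PySem.List.pyGetD parts 8 "") else none)
    = pvCodes ls := by
  rw [List.filterMap_map, pvCodes]
  apply List.filterMap_congr
  intro l _
  simp only [Function.comp_apply]
  by_cases h : 8 < (PySem.Str.split₀ l).length
  · rw [if_pos h, show ((8:Int)) = ((8:Nat):Int) from rfl,
      PySem.List.pyGetD_ofNat _ _ _ h, PySem.List.pyGet?_ofNat _ _ h]
  · rw [if_neg h]
    symm
    rw [PySem.List.pyGet?_eq_none_iff]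
    simp [PySem.Raise.InRange]
    omega

-- ===== VERDICT (by name: the statement is the Claim_ definition above) =====
theorem count_requests_by_code_spec : Claim_equal_count_requests_by_code := by
  intro ls _
  unfold Spec_count_requests_by_code count_requests_by_code count_requests_by_code_alt
  have hA := pvA_fold ls 0 0 0
  have hA' : (((PySem.Dict.empty).insert "200" 0).insert "302" (0:Int)).insert "404" 0
      = pvDict3 0 0 0 := rfl
  rw [hA', hA, pvB_codes]
  simp [pvDict3, PySem.Dict.insert, PySem.Dict.empty, PySem.List.count]
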